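-- pv_equiv track=rewrite | github.com/rnd-ash/ultimate_nag52 | gen_unions.py | get_param_text
-- ===== SOURCE A (Python) =====
-- def clear_bit(mask, bit):
--     return mask & ~(1<<bit)
--
-- def get_data_type(len: int) -> str:
--     if len == 1:
--         return "bool"
--     elif len <= 8:
--         return "uint8_t"
--     elif len <= 16:
--         return "short"
--     elif len <= 32:
--         return "int"
--     else:
--         raise "> 64bit numbers not handled!"
--
-- def get_param_text(name: str, desc: str, offset: int, length: int) -> str:
--     # assume all CAN Frames are 64bits in size, and use BigEndian (All MB ECUs in W203 do!)
--
--     if 64-offset-length < 0: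
--         raise "Shift is less than 0!?"
--
--     mask = 0xFFFFFFFFFFFFFFFF
--
--     start_mask = 63-offset
--     for bit in range(0,length):
--         mask = clear_bit(mask, start_mask-bit)
--
--     f_mask = 0x0
--     for bit in range(0,length):
--         f_mask = (f_mask | 0x01 << bit)
--
--     string = ""
--     string =  "    // Sets {}\n".format(desc)
--     string += "    void set_{}({} value){{ raw = (raw & 0x{:{fill}16x}) | ((uint64_t)value & 0x{:x}) << {}; }}\n".format(name, get_data_type(length), mask, f_mask, 64-length-offset, fill='0')
--     string += "    // Gets {}\n".format(desc)
--     string += "    {} get_{}() {{ return raw >> {} & 0x{:x}; }}\n".format(get_data_type(length), name, 64-length-offset, f_mask)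
--     return string
-- ===== SOURCE B (Python) =====
-- # B: closed-form bitmask arithmetic (no bit loops) + f-string assembly; identical output to A.
-- def get_data_type(len: int) -> str:
--     if len == 1:
--         return "bool"
--     elif len <= 8:
--         return "uint8_t"
--     elif len <= 16:
--         return "short"
--     elif len <= 32:
--         return "int"
--     else:
--         raise "> 64bit numbers not handled!"
--
-- def get_param_text(name: str, desc: str, offset: int, length: int) -> str:
--     if 64-offset-length < 0:
--         raise "Shift is less than 0!?"
--
--     shift = 64 - length - offset
--     f_mask = (1 << length) - 1 if length > 0 else 0
--     mask = 0xFFFFFFFFFFFFFFFF & ~(f_mask << shift)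
--     dtype = get_data_type(length)
--
--     lines = [
--         f"    // Sets {desc}\n",
--         f"    void set_{name}({dtype} value){{ raw = (raw & 0x{mask:016x}) | ((uint64_t)value & 0x{f_mask:x}) << {shift}; }}\n",
--         f"    // Gets {desc}\n",
--         f"    {dtype} get_{name}() {{ return raw >> {shift} & 0x{f_mask:x}; }}\n",
--     ]
--     return "".join(lines)
-- ===== Notes on version B (the rewrite author's own statement) =====
-- stated objective: simpler
-- what changed: Both bit-by-bit loops (clearing the field's bits one at a time and OR-ing up the field mask one bit at a time) are replaced by closed-form mask arithmetic: f_mask = (1 << length) - 1 and mask = 0xFFFFFFFFFFFFFFFF & ~(f_mask << shift); the four output lines are assembled with f-strings and join.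
import Mathlib
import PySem

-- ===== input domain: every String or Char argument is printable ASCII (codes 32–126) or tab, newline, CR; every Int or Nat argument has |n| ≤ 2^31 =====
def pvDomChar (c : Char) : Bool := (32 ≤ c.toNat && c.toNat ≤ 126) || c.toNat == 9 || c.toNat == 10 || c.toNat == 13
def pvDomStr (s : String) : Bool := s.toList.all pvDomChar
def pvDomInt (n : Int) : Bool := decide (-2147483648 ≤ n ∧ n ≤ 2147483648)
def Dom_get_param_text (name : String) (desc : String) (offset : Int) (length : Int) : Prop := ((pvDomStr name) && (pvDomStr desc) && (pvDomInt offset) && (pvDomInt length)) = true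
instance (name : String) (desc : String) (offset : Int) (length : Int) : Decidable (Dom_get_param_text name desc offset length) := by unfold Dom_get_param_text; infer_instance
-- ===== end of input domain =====

-- B replaces A's two bit-by-bit mask loops by closed-form mask arithmetic (objective: simpler).

-- ===== PORT A =====
-- shared formatting helpers ('{:x}' / '{:016x}' / str(n)): exact for the values formatted
-- here, which are nonnegative ints (masks) resp. arbitrary ints (PySem.Int.toChars)
def pvHexDigit (n : Nat) : Char := if n < 10 then Char.ofNat (48 + n) else Char.ofNat (87 + n)

def pvHexChars (n : Nat) : List Char :=
  if _h : n < 16 then [pvHexDigit n]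
  else pvHexChars (n / 16) ++ [pvHexDigit (n % 16)]
termination_by n
decreasing_by exact Nat.div_lt_self (by omega) (by omega)

-- '{:x}' (arguments formatted by both programs are always ≥ 0)
def pvHex (n : Int) : List Char := pvHexChars n.toNat
-- '{:{fill}16x}' with fill='0': zero-pad to width 16
def pvHex16 (n : Int) : List Char :=
  List.replicate (16 - (pvHexChars n.toNat).length) '0' ++ pvHexChars n.toNat

-- helper get_data_type (module context, used by both A and B); the final 'raise' branch
-- (length > 32) is excluded by Pre_, the port returns [] there
def pvGetDataType (len : Int) : List Char :=
  if len = 1 then "bool".toList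
  else if len ≤ 8 then "uint8_t".toList
  else if len ≤ 16 then "short".toList
  else if len ≤ 32 then "int".toList
  else []

def pvClearBit (mask : Int) (bit : Int) : Int :=
  PySem.Int.band mask (Int.not (1 <<< bit.toNat))

def get_param_text (name : String) (desc : String) (offset : Int) (length : Int) : String :=
  if 64 - offset - length < 0 then ""   -- Python: raise "Shift is less than 0!?"; excluded by Pre_
  else
    let start_mask := 63 - offset
    let mask := (PySem.List.pyRange 0 length).foldl
      (fun mask bit => pvClearBit mask (start_mask - bit)) 0xFFFFFFFFFFFFFFFF
    let f_mask := (PySem.List.pyRange 0 length).foldl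
      (fun f_mask bit => PySem.Int.bor f_mask (1 <<< bit.toNat)) 0
    String.mk (
      ("    // Sets ".toList ++ desc.toList ++ "\n".toList) ++
      ("    void set_".toList ++ name.toList ++ "(".toList ++ pvGetDataType length ++
        " value){ raw = (raw & 0x".toList ++ pvHex16 mask ++
        ") | ((uint64_t)value & 0x".toList ++ pvHex f_mask ++ ") << ".toList ++
        PySem.Int.toChars (64 - length - offset) ++ "; }\n".toList) ++
      ("    // Gets ".toList ++ desc.toList ++ "\n".toList) ++
      ("    ".toList ++ pvGetDataType length ++ " get_".toList ++ name.toList ++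
        "() { return raw >> ".toList ++ PySem.Int.toChars (64 - length - offset) ++
        " & 0x".toList ++ pvHex f_mask ++ "; }\n".toList))

-- ===== PORT B =====
def get_param_text_alt (name : String) (desc : String) (offset : Int) (length : Int) : String :=
  if 64 - offset - length < 0 then ""   -- Python: raise "Shift is less than 0!?"; excluded by Pre_
  else
    let shift := 64 - length - offset
    let f_mask : Int := if 0 < length then (1 <<< length.toNat) - 1 else 0
    let mask := PySem.Int.band 0xFFFFFFFFFFFFFFFF (Int.not (f_mask <<< shift.toNat))
    let dtype := pvGetDataType length
    String.mk (List.flatten [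
      "    // Sets ".toList ++ desc.toList ++ "\n".toList,
      "    void set_".toList ++ name.toList ++ "(".toList ++ dtype ++
        " value){ raw = (raw & 0x".toList ++ pvHex16 mask ++
        ") | ((uint64_t)value & 0x".toList ++ pvHex f_mask ++ ") << ".toList ++
        PySem.Int.toChars shift ++ "; }\n".toList,
      "    // Gets ".toList ++ desc.toList ++ "\n".toList,
      "    ".toList ++ dtype ++ " get_".toList ++ name.toList ++ "() { return raw >> ".toList ++
        PySem.Int.toChars shift ++ " & 0x".toList ++ pvHex f_mask ++ "; }\n".toList])

-- ===== PRECONDITION & SPEC =====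
-- Pre_ excludes exactly the inputs where the Python A raises (a TypeError from 'raise <str>'):
-- a negative shift (64-offset-length < 0) or a width get_data_type refuses (length > 32).
def Pre_get_param_text (name : String) (desc : String) (offset : Int) (length : Int) : Prop :=
  0 ≤ 64 - offset - length ∧ length ≤ 32
instance (name : String) (desc : String) (offset : Int) (length : Int) : Decidable (Pre_get_param_text name desc offset length) := by unfold Pre_get_param_text; infer_instance

def pvWitness_get_param_text : String × String × Int × Int := ("speed", "vehicle speed", 8, 12)

def Spec_get_param_text (name : String) (desc : String) (offset : Int) (length : Int) (out : String) : Prop := out = get_param_text_alt name desc offset length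
instance (name : String) (desc : String) (offset : Int) (length : Int) (out : String) : Decidable (Spec_get_param_text name desc offset length out) := by unfold Spec_get_param_text; infer_instance

-- ===== CLAIM (what is proved, stated in full; the proofs are below) =====
def Claim_equal_get_param_text : Prop := ∀ (name : String) (desc : String) (offset : Int) (length : Int), Dom_get_param_text name desc offset length → Pre_get_param_text name desc offset length → Spec_get_param_text name desc offset length (get_param_text name desc offset length)

-- ===== LEMMAS AND PROOFS =====

-- Python 'm & ~x' for nonnegative m, x, in Nat terms
theorem pvBandNot (m x : Nat) :
    PySem.Int.band (m : Int) (Int.not (x : Int)) = ((m - (m &&& x) : Nat) : Int) := by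
  have h1 : Int.not (x : Int) = Int.negSucc x := rfl
  rw [h1]
  simp [PySem.Int.band, Int.negSucc_eq]
  intro hx
  exfalso; omega

-- disjoint Nat addition is xor
theorem pvAddOfAndZero (a b : Nat) (h : a &&& b = 0) : a + b = a ^^^ b := by
  induction a using Nat.binaryRec generalizing b with
  | zero => simp
  | bit ab am ih =>
    cases b using Nat.bitCasesOn with
    | bit bb bm =>
      rw [Nat.land_bit, Nat.bit_eq_zero_iff] at h
      rw [Nat.xor_bit]
      have hbb := h.2
      have hih := ih bm h.1
      rw [Nat.bit_val, Nat.bit_val, Nat.bit_val]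
      cases ab <;> cases bb <;> simp at hbb ⊢ <;> omega

-- subtracting a submask is xor-ing it
theorem pvSubAnd (x y : Nat) : x - (x &&& y) = x ^^^ (x &&& y) := by
  have h0 : (x ^^^ (x &&& y)) &&& (x &&& y) = 0 := by
    apply Nat.eq_of_testBit_eq
    intro i
    simp [Nat.testBit_and, Nat.testBit_xor]
    cases x.testBit i <;> cases y.testBit i <;> simp
  have h1 := pvAddOfAndZero _ _ h0
  rw [Nat.xor_xor_cancel_right] at h1
  have h2 : x &&& y ≤ x := Nat.and_le_left
  omega

theorem pvOrPow (n : Nat) : (2 ^ n - 1) ||| 2 ^ n = 2 ^ (n + 1) - 1 := by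
  apply Nat.eq_of_testBit_eq
  intro i
  simp [Nat.testBit_two_pow_sub_one, Nat.testBit_two_pow]
  by_cases h1 : i < n <;> by_cases h2 : n = i <;> simp [h1, h2] <;> omega

theorem pvCastShl (m k : Nat) : ((m : Int) <<< k) = ((m <<< k : Nat) : Int) := by
  rw [Int.shiftLeft_eq, Nat.shiftLeft_eq]
  push_cast
  ring

theorem pvFmaskFold (n : Nat) :
    (PySem.List.pyRange 0 (n : Int)).foldl
      (fun f_mask bit => PySem.Int.bor f_mask (1 <<< bit.toNat)) 0
      = ((2 ^ n - 1 : Nat) : Int) := by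
  induction n with
  | zero => simp [show PySem.List.pyRange 0 0 = [] from rfl]
  | succ n ih =>
    rw [Nat.cast_add_one, PySem.List.pyRange_one_succ_right (by positivity), List.foldl_append, ih]
    simp only [List.foldl_cons, List.foldl_nil, Int.toNat_natCast]
    rw [PySem.Int.bor_natCast, Nat.one_shiftLeft, pvOrPow]

-- one clearing step, in Nat terms
theorem pvStepNat (s n : Nat) :
    (0xFFFFFFFFFFFFFFFF - (0xFFFFFFFFFFFFFFFF &&& ((2 ^ n - 1) <<< (s + 1))))
      - ((0xFFFFFFFFFFFFFFFF - (0xFFFFFFFFFFFFFFFF &&& ((2 ^ n - 1) <<< (s + 1)))) &&& 2 ^ s)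
    = 0xFFFFFFFFFFFFFFFF - (0xFFFFFFFFFFFFFFFF &&& ((2 ^ (n + 1) - 1) <<< s)) := by
  rw [show (0xFFFFFFFFFFFFFFFF : Nat) = 2 ^ 64 - 1 by norm_num]
  rw [pvSubAnd, pvSubAnd, pvSubAnd]
  apply Nat.eq_of_testBit_eq
  intro i
  simp only [Nat.testBit_xor, Nat.testBit_and, Nat.testBit_shiftLeft, Nat.testBit_two_pow_sub_one,
    Nat.testBit_two_pow, ge_iff_le]
  by_cases hsi : s < i <;> by_cases hse : s = i <;>
    by_cases hn1 : i - (s + 1) < n <;> by_cases h64 : i < 64 <;> by_cases hns : i ≤ n + s <;>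
    simp [hsi, hse, hn1, h64, hns] <;> omega

theorem pvMaskFold (off : Int) (n : Nat) (h : 0 ≤ 64 - off - (n : Int)) :
    (PySem.List.pyRange 0 (n : Int)).foldl
      (fun mask bit => pvClearBit mask (63 - off - bit)) 0xFFFFFFFFFFFFFFFF
      = ((0xFFFFFFFFFFFFFFFF - (0xFFFFFFFFFFFFFFFF &&& ((2 ^ n - 1) <<< (64 - off - (n : Int)).toNat)) : Nat) : Int) := by
  induction n with
  | zero =>
    norm_num [show PySem.List.pyRange 0 0 = [] from rfl, Nat.zero_shiftLeft]
  | succ n ih =>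
    have h' : 0 ≤ 64 - off - (n : Int) := by push_cast at h ⊢; omega
    rw [Nat.cast_add_one, PySem.List.pyRange_one_succ_right (by positivity), List.foldl_append,
      ih h']
    simp only [List.foldl_cons, List.foldl_nil]
    unfold pvClearBit
    have e1 : (63 - off - (n : Int)).toNat = (64 - off - ((n : Int) + 1)).toNat := by omega
    have e2 : (64 - off - (n : Int)).toNat = (64 - off - ((n : Int) + 1)).toNat + 1 := by
      push_cast at h ⊢; omega
    rw [e1, e2, Nat.one_shiftLeft, pvBandNot]
    congr 1
    exact pvStepNat _ n

-- ===== VERDICT (by name: the statement is the Claim_ definition above) =====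
theorem get_param_text_spec : Claim_equal_get_param_text := by
  intro name desc offset length _hD hPre
  obtain ⟨h1, h2⟩ := hPre
  unfold Spec_get_param_text
  simp only [get_param_text, get_param_text_alt]
  rw [if_neg (by omega), if_neg (by omega)]
  by_cases hl : length ≤ 0
  · rw [PySem.List.pyRange_one_eq_nil (by omega)]
    simp only [List.foldl_nil, if_neg (by omega : ¬ (0:Int) < length)]
    rw [show ((0:Int) <<< (64 - length - offset).toNat) = 0 by simp]
    rw [show PySem.Int.band 0xFFFFFFFFFFFFFFFF (Int.not 0) = 0xFFFFFFFFFFFFFFFF from by decide]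
    simp [List.append_assoc]
  · have hl : 0 < length := by omega
    obtain ⟨n, rfl⟩ : ∃ m : Nat, length = (m : Int) :=
      ⟨length.toNat, (Int.toNat_of_nonneg (by omega)).symm⟩
    rw [pvFmaskFold, pvMaskFold offset n (by omega)]
    rw [if_pos (by exact_mod_cast hl)]
    rw [Int.toNat_natCast, Nat.one_shiftLeft]
    rw [show ((2 ^ n : Nat) : Int) - 1 = ((2 ^ n - 1 : Nat) : Int) by
      rw [Nat.cast_sub Nat.one_le_two_pow]; push_cast; ring]
    rw [pvCastShl]
    rw [show (0xFFFFFFFFFFFFFFFF : Int) = ((0xFFFFFFFFFFFFFFFF : Nat) : Int) from by norm_num]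
    rw [pvBandNot]
    rw [show (64 - (n : Int) - offset).toNat = (64 - offset - (n : Int)).toNat from by omega]
    simp [List.append_assoc]
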